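-- pv_equiv track=rewrite | github.com/JSebastian-Villa/Analisis_de_algoritmos | repasogreedy2.py | colocar_wifi
-- ===== SOURCE A (Python) =====
-- start = [1,3,0,5,8,5]
--
-- def colocar_wifi(edificios, rango):
--
--     # Ordenar las posiciones de los edificios de menor a mayor
--     edificios.sort()
--
--     # Índice para recorrer los edificios
--     i = 0
--
--     # Cantidad total de edificios
--     n = len(edificios)
--
--     # Lista donde se guardan las posiciones de los routers
--     routers = []
--
--     # Mientras aún queden edificios sin cubrir
--     while i < n:
--
--         # Tomamos el edificio más a la izquierda que aún no está cubierto
--         start = edificios[i]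
--
--         # Avanzamos mientras los edificios estén dentro del rango
--         # donde aún se podría colocar el router
--         while i < n and edificios[i] <= start + rango:
--             i += 1
--
--         # Colocamos el router en el edificio más a la derecha posible
--         # que todavía cubre al primero
--         router = edificios[i-1]
--
--         # Guardamos la posición del router
--         routers.append(router)
--
--         # Saltamos todos los edificios que quedan cubiertos por ese router
--         while i < n and edificios[i] <= router + rango:
--             i += 1
--
--     # Devolver la lista de posiciones donde se colocaron los routers
--     return routers
--
-- edificios = [2,4,7,10,13,15]
-- ===== SOURCE B (Python) =====
-- def colocar_wifi(edificios, rango):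
--     # Sort in place, like the original (mutates the argument).
--     edificios.sort()
--     routers = []
--     # Single left-to-right pass with an explicit state machine:
--     #   None            -> waiting for the start of a new uncovered segment
--     #   (True, s, c)    -> segment started at s, c = rightmost building still within s+rango
--     #   (False, r, r)   -> skipping buildings already covered by router r
--     state = None
--     for b in edificios:
--         if state is None:
--             state = (True, b, b)
--         elif state[0]:
--             s, c = state[1], state[2]
--             if b <= s + rango:
--                 state = (True, s, b)
--             else:
--                 routers.append(c)
--                 state = (True, b, b) if c + rango < b else (False, c, c)
--         else:
--             r = state[1]
--             if r + rango < b: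
--                 state = (True, b, b)
--     if state is not None and state[0]:
--         routers.append(state[2])
--     return routers
-- ===== Notes on version B (the rewrite author's own statement) =====
-- stated objective: alternative
-- what changed: A's index-driven outer while with two nested sequential scans is replaced by a single left-to-right fold over the sorted list driven by a three-state machine (start-segment / extend-candidate / skip-covered) with a final flush.
import Mathlib
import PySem

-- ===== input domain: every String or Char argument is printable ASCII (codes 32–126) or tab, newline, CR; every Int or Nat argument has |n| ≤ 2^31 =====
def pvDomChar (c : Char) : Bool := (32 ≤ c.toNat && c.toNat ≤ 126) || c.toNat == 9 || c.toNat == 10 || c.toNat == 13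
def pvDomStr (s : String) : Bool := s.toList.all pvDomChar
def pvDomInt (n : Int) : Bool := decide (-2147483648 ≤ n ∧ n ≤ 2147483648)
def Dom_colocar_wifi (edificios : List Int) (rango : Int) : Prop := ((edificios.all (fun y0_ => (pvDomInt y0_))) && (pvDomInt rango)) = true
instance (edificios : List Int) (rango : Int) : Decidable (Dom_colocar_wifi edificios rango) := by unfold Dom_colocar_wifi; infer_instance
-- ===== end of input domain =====

-- B replaces A's index-driven while loop with two nested scans by a single fold over the
-- sorted list driven by a three-state machine (objective: alternative).
-- Both A and B sort `edificios` in place; the equivalence proved here is about the return value.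

-- ===== PORT A =====
-- inner 'while i < n and edificios[i] <= bound: i += 1' (shared by both inner loops of A)
def pvScanA (es : List Int) (n : Nat) (bound : Int) (i : Nat) : Nat :=
  if h : i < n then
    if es.getD i 0 ≤ bound then pvScanA es n bound (i + 1) else i
  else i
termination_by n - i

-- outer 'while i < n'; Python's loop has no bound, so fuel n+1 (enough on Pre_: i grows each
-- iteration); fuel 0 returns the routers built so far
def pvLoopA (es : List Int) (n : Nat) (rango : Int) (fuel i : Nat) (routers : List Int) : List Int :=
  match fuel with
  | 0 => routers
  | fuel + 1 =>
    if i < n then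
      let start := es.getD i 0
      let i1 := pvScanA es n (start + rango) i
      match PySem.List.pyGet? es ((i1 : Int) - 1) with   -- edificios[i-1], Python negative-index rule
      | some router =>
        let i2 := pvScanA es n (router + rango) i1
        pvLoopA es n rango fuel i2 (routers ++ [router])
      | none => routers
    else routers

def colocar_wifi (edificios : List Int) (rango : Int) : List Int :=
  let es := PySem.List.sorted edificios (fun x => x)
  pvLoopA es es.length rango (es.length + 1) 0 []

-- ===== PORT B =====
-- the loop body of Source B: state none = waiting for a new segment, some (true, s, c) = segment
-- started at s with candidate c, some (false, r, r) = skipping buildings covered by router r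
def pvStepB (rango : Int) (acc : List Int × Option (Bool × Int × Int)) (b : Int) :
    List Int × Option (Bool × Int × Int) :=
  match acc.2 with
  | none => (acc.1, some (true, b, b))
  | some (true, s, c) =>
      if b ≤ s + rango then (acc.1, some (true, s, b))
      else (acc.1 ++ [c], if c + rango < b then some (true, b, b) else some (false, c, c))
  | some (false, r, _) =>
      if r + rango < b then (acc.1, some (true, b, b)) else acc

-- the trailing 'if state is not None and state[0]: routers.append(state[2])'
def pvFinB (acc : List Int × Option (Bool × Int × Int)) : List Int :=
  match acc.2 with
  | some (true, _, c) => acc.1 ++ [c]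
  | _ => acc.1

def colocar_wifi_alt (edificios : List Int) (rango : Int) : List Int :=
  let es := PySem.List.sorted edificios (fun x => x)
  pvFinB (es.foldl (pvStepB rango) ([], none))

-- ===== PRECONDITION & SPEC =====
-- Pre_ excludes nonempty lists with negative rango: there A's skip loop can never advance
-- past the last reached index, so the Python while-loop diverges (no value is returned).
def Pre_colocar_wifi (edificios : List Int) (rango : Int) : Prop :=
  edificios = [] ∨ 0 ≤ rango
instance (edificios : List Int) (rango : Int) : Decidable (Pre_colocar_wifi edificios rango) := by
  unfold Pre_colocar_wifi; infer_instance

def pvWitness_colocar_wifi : List Int × Int := ([2, 4, 7, 10, 13, 15], 2)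

def Spec_colocar_wifi (edificios : List Int) (rango : Int) (out : List Int) : Prop :=
  out = colocar_wifi_alt edificios rango
instance (edificios : List Int) (rango : Int) (out : List Int) :
    Decidable (Spec_colocar_wifi edificios rango out) := by unfold Spec_colocar_wifi; infer_instance

-- ===== CLAIM =====
def Claim_equal_colocar_wifi : Prop :=
  ∀ (edificios : List Int) (rango : Int), Dom_colocar_wifi edificios rango →
    Pre_colocar_wifi edificios rango →
    Spec_colocar_wifi edificios rango (colocar_wifi edificios rango)

-- ===== LEMMAS AND PROOFS =====

-- reference: the greedy segment decomposition both programs compute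
def pvGreedy (rango : Int) : List Int → List Int
  | [] => []
  | b :: rest =>
    let t := rest.takeWhile (fun x => decide (x ≤ b + rango))
    let r := t.getLastD b
    r :: pvGreedy rango ((rest.drop t.length).dropWhile (fun x => decide (x ≤ r + rango)))
termination_by l => l.length
decreasing_by
  simp only [List.length_cons]
  have h1 := List.length_dropWhile_le (fun x => decide (x ≤ (rest.takeWhile (fun x => decide (x ≤ b + rango))).getLastD b + rango)) (rest.drop (rest.takeWhile (fun x => decide (x ≤ b + rango))).length)
  have h2 := List.length_drop (l := rest) (i := (rest.takeWhile (fun x => decide (x ≤ b + rango))).length)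
  omega

theorem pvDropWhile_eq_drop {α : Type} (p : α → Bool) (l : List α) :
    l.dropWhile p = l.drop (l.takeWhile p).length := by
  induction l with
  | nil => rfl
  | cons x xs ih =>
    by_cases h : p x
    · simp [h, ih]
    · simp [h]

-- A's linear scan computes i + length of the leading run ≤ bound of es.drop i
theorem pvScanA_eq_takeWhile (es : List Int) (bound : Int) (i : Nat) :
    pvScanA es es.length bound i
      = i + ((es.drop i).takeWhile (fun x => decide (x ≤ bound))).length := by
  fun_induction pvScanA es es.length bound i with
  | case1 i h hle ih =>
    rw [ih, List.drop_eq_getElem_cons h, List.takeWhile_cons]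
    simp only [List.getD_eq_getElem?_getD, List.getElem?_eq_getElem h, Option.getD_some] at hle
    simp [hle]
    omega
  | case2 i h hle =>
    rw [List.drop_eq_getElem_cons h, List.takeWhile_cons]
    simp only [List.getD_eq_getElem?_getD, List.getElem?_eq_getElem h, Option.getD_some] at hle
    simp [hle]
  | case3 i h =>
    rw [List.drop_eq_nil_iff.mpr (by omega)]
    simp

-- the candidate A reads back from the array is the last element of the leading run
theorem pvRun_getLast (es : List Int) (i : Nat) (b : Int) (p : Int → Bool)
    (hi : i < es.length) (hb : es[i] = b) :
    es[i + ((es.drop (i+1)).takeWhile p).length]?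
      = some (((es.drop (i+1)).takeWhile p).getLastD b) := by
  rcases hT : (es.drop (i+1)).takeWhile p with _ | ⟨y, ys⟩
  · simp [List.getElem?_eq_getElem hi, hb]
  · have hpre : (y :: ys) <+: es.drop (i+1) := hT ▸ List.takeWhile_prefix p
    have hlt : (y :: ys).length - 1 < (y :: ys).length := by simp
    have h1 : (y :: ys)[(y :: ys).length - 1]? = (es.drop (i+1))[(y :: ys).length - 1]? := by
      rcases hpre with ⟨tl, htl⟩
      rw [← htl, List.getElem?_append_left hlt]
    rw [show i + (y :: ys).length = (i+1) + ((y :: ys).length - 1) by simp; omega,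
        ← List.getElem?_drop, ← h1,
        List.getLastD_eq_getLast?, ← List.getLast?_eq_getElem?]
    cases hys : (y :: ys).getLast? with
    | none => simp [List.getLast?_eq_none_iff] at hys
    | some z => simp

-- A's loop from index i computes the greedy decomposition of the suffix es.drop i
theorem pvLoopA_eq_greedy (es : List Int) (rango : Int) (hr : 0 ≤ rango) :
    ∀ (fuel i : Nat) (routers : List Int), es.length ≤ i + fuel →
      pvLoopA es es.length rango fuel i routers = routers ++ pvGreedy rango (es.drop i) := by
  intro fuel
  induction fuel with
  | zero =>
    intro i routers hfu
    rw [pvLoopA, List.drop_eq_nil_iff.mpr (by omega)]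
    simp [pvGreedy]
  | succ fuel ih =>
    intro i routers hfu
    rw [pvLoopA]
    by_cases hi : i < es.length
    · simp only [hi, if_true]
      have hb : es.getD i 0 = es[i] := by
        simp [List.getD_eq_getElem?_getD, List.getElem?_eq_getElem hi]
      set b := es[i] with hbdef
      -- the first scan
      have hdrop : es.drop i = b :: es.drop (i+1) := List.drop_eq_getElem_cons hi
      set p : Int → Bool := fun x => decide (x ≤ b + rango) with hp
      set t := (es.drop (i+1)).takeWhile p with ht
      set L := t.length with hLdef
      have hpb : p b = true := by rw [hp]; simp only [decide_eq_true_eq]; omega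
      clear_value p t L
      have hscan1 : pvScanA es es.length (es.getD i 0 + rango) i = i + 1 + L := by
        rw [hb, pvScanA_eq_takeWhile, ← hp, hdrop, List.takeWhile_cons, if_pos hpb,
            List.length_cons, ← ht, ← hLdef]
        omega
      have hLle : L ≤ es.length - (i+1) := by
        rw [hLdef, ht]
        have := (List.takeWhile_prefix (l := es.drop (i+1)) p).length_le
        simp only [List.length_drop] at this
        omega
      -- the element read back
      have hidx : i + L < es.length := by omega
      have hget : PySem.List.pyGet? es ((((i + 1 + L : Nat)) : Int) - 1)
          = some (t.getLastD b) := by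
        have hcast : (((i + 1 + L : Nat)) : Int) - 1 = ((i + L : Nat) : Int) := by
          push_cast; ring
        rw [hcast, PySem.List.pyGet?_natCast, hLdef, ht]
        exact pvRun_getLast es i b p hi rfl
      rw [hscan1]
      simp only [hget]
      set r := t.getLastD b with hr2
      -- the second scan
      have hdrop2 : es.drop (i + 1 + L) = (es.drop (i+1)).drop L := by
        rw [List.drop_drop]
      set q : Int → Bool := fun x => decide (x ≤ r + rango) with hq
      clear_value q
      have hscan2 : pvScanA es es.length (r + rango) (i + 1 + L)
          = i + 1 + L + ((es.drop (i + 1 + L)).takeWhile q).length := by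
        rw [pvScanA_eq_takeWhile, ← hq]
      rw [hscan2, ih (i + 1 + L + ((es.drop (i + 1 + L)).takeWhile q).length) (routers ++ [t.getLastD b]) (by
        have := (List.takeWhile_prefix (l := es.drop (i + 1 + L)) q).length_le
        simp only [List.length_drop] at this
        omega)]
      -- match the greedy step
      have hgoal : pvGreedy rango (es.drop i)
          = r :: pvGreedy rango (es.drop (i + 1 + L + ((es.drop (i + 1 + L)).takeWhile q).length)) := by
        rw [hdrop, pvGreedy]
        simp only [← hp, ← ht, ← hLdef, ← hr2, ← hq]
        congr 1
        rw [← hdrop2, pvDropWhile_eq_drop, List.drop_drop]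
      rw [hgoal]
      simp [hr2, List.getLastD_eq_getLast?]
    · simp only [hi, if_false]
      rw [List.drop_eq_nil_iff.mpr (by omega)]
      simp [pvGreedy]

-- B-side: folding a run whose elements are all within s+rango just updates the candidate
theorem pvFoldB_run (rango : Int) (t : List Int) :
    ∀ (routers : List Int) (s c : Int), (∀ x ∈ t, x ≤ s + rango) →
      t.foldl (pvStepB rango) (routers, some (true, s, c))
        = (routers, some (true, s, t.getLastD c)) := by
  induction t with
  | nil => intro routers s c _; simp
  | cons x xs ih =>
    intro routers s c hall
    have hx : x ≤ s + rango := hall x (by simp)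
    rw [List.foldl_cons]
    have hstep : pvStepB rango (routers, some (true, s, c)) x
        = (routers, some (true, s, x)) := by
      simp [pvStepB, hx]
    rw [hstep, ih _ _ _ (fun y hy => hall y (by simp [hy])), List.getLastD_cons]

-- B-side: from the skip state, the fold finalizes like the waiting state on the uncovered tail
theorem pvFoldB_skip (rango : Int) (u : List Int) :
    ∀ (routers : List Int) (r c : Int),
      pvFinB (u.foldl (pvStepB rango) (routers, some (false, r, c)))
        = pvFinB ((u.dropWhile (fun x => decide (x ≤ r + rango))).foldl (pvStepB rango) (routers, none)) := by
  induction u with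
  | nil => intro routers r c; simp [pvFinB]
  | cons x xs ih =>
    intro routers r c
    by_cases hx : x ≤ r + rango
    · have hstep : pvStepB rango (routers, some (false, r, c)) x
          = (routers, some (false, r, c)) := by
        simp [pvStepB]; omega
      rw [List.foldl_cons, hstep, ih, List.dropWhile_cons]
      simp [hx]
    · rw [List.dropWhile_cons]
      have hA : pvStepB rango (routers, some (false, r, c)) x
          = (routers, some (true, x, x)) := by
        simp [pvStepB]; omega
      have hB : pvStepB rango (routers, none) x = (routers, some (true, x, x)) := rfl
      simp only [hx, decide_false, Bool.false_eq_true, if_false, List.foldl_cons, hA, hB]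

-- B-side: once the head of the rest is out of range, emitting the candidate and entering
-- the skip state is exactly what one fold step does, in both of its sub-cases
theorem pvFoldB_emit (rango : Int) (x s c : Int) (u : List Int) (routers : List Int)
    (hx : ¬ x ≤ s + rango) :
    (x :: u).foldl (pvStepB rango) (routers, some (true, s, c))
      = (x :: u).foldl (pvStepB rango) (routers ++ [c], some (false, c, c)) := by
  rw [List.foldl_cons, List.foldl_cons]
  by_cases hcx : c + rango < x
  · have h1 : pvStepB rango (routers, some (true, s, c)) x
        = (routers ++ [c], some (true, x, x)) := by simp [pvStepB, hx, hcx]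
    have h2 : pvStepB rango (routers ++ [c], some (false, c, c)) x
        = (routers ++ [c], some (true, x, x)) := by simp [pvStepB, hcx]
    rw [h1, h2]
  · have h1 : pvStepB rango (routers, some (true, s, c)) x
        = (routers ++ [c], some (false, c, c)) := by simp [pvStepB, hx, hcx]
    have h2 : pvStepB rango (routers ++ [c], some (false, c, c)) x
        = (routers ++ [c], some (false, c, c)) := by simp [pvStepB]; omega
    rw [h1, h2]

-- B's fold computes the greedy decomposition (no hypotheses needed)
theorem pvFoldB_eq_greedy (rango : Int) :
    ∀ (n : Nat) (l : List Int) (routers : List Int), l.length ≤ n →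
      pvFinB (l.foldl (pvStepB rango) (routers, none)) = routers ++ pvGreedy rango l := by
  intro n
  induction n with
  | zero =>
    intro l routers hl
    have : l = [] := List.eq_nil_of_length_eq_zero (by omega)
    subst this
    simp [pvFinB, pvGreedy]
  | succ n ih =>
    intro l routers hl
    rcases l with _ | ⟨b, rest⟩
    · simp [pvFinB, pvGreedy]
    · rw [List.foldl_cons]
      have h0 : pvStepB rango (routers, none) b = (routers, some (true, b, b)) := rfl
      rw [h0]
      set p : Int → Bool := fun x => decide (x ≤ b + rango) with hp
      set t := rest.takeWhile p with ht
      set u := rest.dropWhile p with hu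
      have hsplit : rest = t ++ u := (List.takeWhile_append_dropWhile).symm
      have hall : ∀ x ∈ t, x ≤ b + rango := by
        intro x hxm
        have := List.mem_takeWhile_imp (ht ▸ hxm)
        simpa [hp] using this
      rw [hsplit, List.foldl_append, pvFoldB_run rango t routers b b hall]
      set r := t.getLastD b with hr2
      have hgreedy : pvGreedy rango (b :: rest)
          = r :: pvGreedy rango (u.dropWhile (fun x => decide (x ≤ r + rango))) := by
        rw [pvGreedy]
        simp only [← hp, ← ht, ← hr2]
        congr 2
        rw [← pvDropWhile_eq_drop, ← hu]
      rcases hu2 : u with _ | ⟨x, u'⟩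
      · rw [← hu2, ← hsplit, hgreedy, hu2]
        simp only [List.foldl_nil, List.dropWhile_nil]
        simp [pvFinB, pvGreedy]
      · have hx : ¬ x ≤ b + rango := by
          have := List.head?_dropWhile_not p rest
          rw [← hu, hu2] at this
          simpa [hp] using this
        rw [← hu2, ← hsplit, hgreedy, hu2, pvFoldB_emit rango x b r u' routers hx,
            pvFoldB_skip rango (x :: u') (routers ++ [r]) r r]
        have hlen : ((x :: u').dropWhile (fun y => decide (y ≤ r + rango))).length ≤ n := by
          have h1 := List.length_dropWhile_le (fun y => decide (y ≤ r + rango)) (x :: u')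
          have h2 := List.length_dropWhile_le p rest
          rw [← hu, hu2] at h2
          simp only [List.length_cons] at hl h1 h2 ⊢
          omega
        rw [ih _ _ hlen]
        simp

-- ===== VERDICT =====
theorem colocar_wifi_spec : Claim_equal_colocar_wifi := by
  intro edificios rango _ hpre
  unfold Spec_colocar_wifi colocar_wifi colocar_wifi_alt
  rcases hpre with hnil | hr
  · subst hnil
    rfl
  · set es := PySem.List.sorted edificios (fun x => x) with hes
    have hA := pvLoopA_eq_greedy es rango hr (es.length + 1) 0 [] (by omega)
    have hB := pvFoldB_eq_greedy rango es.length es [] (le_refl _)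
    simp only [List.drop_zero] at hA
    simp only [List.nil_append] at hA hB
    rw [hA, hB]
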